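-- pv_equiv track=rewrite | github.com/crljstn-tzn/rest_serv | restclient.py | resolve_course_reference
-- ===== SOURCE A (Python) =====
-- def resolve_course_reference(course_lines: list[str], value: str) -> str:
--     # Accept either the numeric course ID or the visible course code.
--     candidate = value.strip()
--     if not candidate:
--         return ""
--
--     if candidate.isdigit():
--         return candidate
--
--     normalized = candidate.casefold()
--
--     for line in course_lines:
--         if not line.startswith("["):
--             continue
--
--         closing_bracket = line.find("]")
--         if closing_bracket <= 1:
--             continue
--
--         course_id = line[1:closing_bracket].strip()
--         remainder = line[closing_bracket + 1 :].lstrip()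
--         course_code = remainder.split(" - ", 1)[0].strip()
--
--         if normalized == course_code.casefold():
--             return course_id
--
--     return ""
-- ===== SOURCE B (Python) =====
-- def _parse_course_line(line):
--     if line[:1] != "[":
--         return None
--     head, sep, tail = line.partition("]")
--     if not sep or len(head) <= 1:
--         return None
--     course_code = tail.lstrip().split(" - ", 1)[0]
--     return (course_code.strip().casefold(), head[1:].strip())
--
--
-- def resolve_course_reference(course_lines: list[str], value: str) -> str:
--     candidate = value.strip()
--     if not candidate:
--         return ""
--     if candidate.isdigit():
--         return candidate
--     # Build a code->id index from the reversed list with plain assignment,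
--     # so the earliest occurrence of a code wins, then do one lookup.
--     pairs = (_parse_course_line(line) for line in reversed(course_lines))
--     index = dict(p for p in pairs if p is not None)
--     return index.get(candidate.casefold(), "")
-- ===== Notes on version B (the rewrite author's own statement) =====
-- stated objective: alternative
-- what changed: B factors line parsing into a partition-based helper and replaces A's inline first-match early-return scan by building a code->id dict from the reversed list (so the earliest occurrence wins) and doing a single lookup with a default.
import Mathlib
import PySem

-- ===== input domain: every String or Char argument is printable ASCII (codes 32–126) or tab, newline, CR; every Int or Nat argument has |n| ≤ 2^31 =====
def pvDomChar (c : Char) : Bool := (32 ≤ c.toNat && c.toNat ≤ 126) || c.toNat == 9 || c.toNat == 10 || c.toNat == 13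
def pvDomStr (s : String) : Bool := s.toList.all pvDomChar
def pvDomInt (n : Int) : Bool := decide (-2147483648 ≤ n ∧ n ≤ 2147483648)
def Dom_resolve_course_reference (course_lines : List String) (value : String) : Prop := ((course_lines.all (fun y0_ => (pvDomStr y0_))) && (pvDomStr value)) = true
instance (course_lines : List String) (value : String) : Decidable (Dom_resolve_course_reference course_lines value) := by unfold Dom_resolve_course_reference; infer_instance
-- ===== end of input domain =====

-- B replaces A's inline first-match scan by a parse helper plus a build-index-then-query shape
-- (dict built from the reversed list, one lookup): structurally different, same cost.
-- casefold is ported as PySem.Str.lower, exact on the ASCII domain Dom_ states.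

-- ===== PORT A =====
def resolveLoopA (normalized : String) : List String → String
  | [] => ""
  | line :: rest =>
    if ¬ (PySem.Str.startswith line "[" = true) then resolveLoopA normalized rest
    else
      let closing_bracket := PySem.Str.find line "]"
      if closing_bracket ≤ 1 then resolveLoopA normalized rest
      else
        let course_id := PySem.Str.strip (PySem.Str.slice line (some 1) (some closing_bracket))
        let remainder := PySem.Str.lstrip (PySem.Str.slice line (some (closing_bracket + 1)) none)
        let course_code := PySem.Str.strip (((PySem.Str.splitMax? remainder " - " 1).getD []).headD "")
        if normalized = PySem.Str.lower course_code then course_id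
        else resolveLoopA normalized rest

def resolve_course_reference (course_lines : List String) (value : String) : String :=
  let candidate := PySem.Str.strip value
  if PySem.Str.len candidate = 0 then ""
  else if PySem.Str.strIsdigit candidate = true then candidate
  else resolveLoopA (PySem.Str.lower candidate) course_lines

-- ===== PORT B =====
-- line.partition("]") is hand-ported, exactly: sep == "" is find = -1, head is line[:find], tail is line[find+1:]
-- (partition splits at the FIRST occurrence, which is what find points at); line[:1] is slice; the
-- short-circuiting 'or' of the guard is two ifs.
def parseCourseLine? (line : String) : Option (String × String) :=
  if ¬ (PySem.Str.slice line none (some 1) = "[") then none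
  else if PySem.Str.find line "]" = -1 then none
  else if PySem.Str.len (PySem.Str.slice line none (some (PySem.Str.find line "]"))) ≤ 1 then none
  else
    let course_code := ((PySem.Str.splitMax? (PySem.Str.lstrip (PySem.Str.slice line (some (PySem.Str.find line "]" + 1)) none)) " - " 1).getD []).headD ""
    some (PySem.Str.lower (PySem.Str.strip course_code),
          PySem.Str.strip (PySem.Str.slice (PySem.Str.slice line none (some (PySem.Str.find line "]"))) (some 1) none))

def resolve_course_reference_alt (course_lines : List String) (value : String) : String :=
  let candidate := PySem.Str.strip value
  if PySem.Str.len candidate = 0 then ""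
  else if PySem.Str.strIsdigit candidate = true then candidate
  else
    let pairs := course_lines.reverse.filterMap parseCourseLine?
    let index := pairs.foldl (fun d p => d.insert p.1 p.2) (PySem.Dict.empty : PySem.Dict String String)
    index.getD (PySem.Str.lower candidate) ""

-- ===== PRECONDITION & SPEC =====
def Spec_resolve_course_reference (course_lines : List String) (value : String) (out : String) : Prop := out = resolve_course_reference_alt course_lines value
instance (course_lines : List String) (value : String) (out : String) : Decidable (Spec_resolve_course_reference course_lines value out) := by unfold Spec_resolve_course_reference; infer_instance

-- ===== CLAIM (what is proved, stated in full; the proofs are below) =====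
def Claim_equal_resolve_course_reference : Prop := ∀ (course_lines : List String) (value : String), Dom_resolve_course_reference course_lines value → Spec_resolve_course_reference course_lines value (resolve_course_reference course_lines value)

-- ===== LEMMAS AND PROOFS =====

-- head[1:] of head = line[:cb] is line[1:cb].
theorem slice_slice_one (line : String) (i : Int) (h0 : 0 ≤ i) :
    PySem.Str.slice (PySem.Str.slice line none (some i)) (some 1) none = PySem.Str.slice line (some 1) (some i) := by
  apply String.toList_inj.mp
  simp [PySem.List.slice_to _ h0, PySem.List.slice_toNat _ (by norm_num : (0:Int) ≤ 1) h0,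
    PySem.List.slice_from _ (by norm_num : (0:Int) ≤ 1), List.drop_take, List.drop_one]

-- line[:1] == "[" is startswith("[").
theorem slice_one_eq_bracket_iff (line : String) :
    (PySem.Str.slice line none (some 1) = "[") ↔ (PySem.Str.startswith line "[" = true) := by
  rw [← String.toList_inj]
  simp [PySem.Chars.startswith_iff, List.prefix_iff_eq_take,
    PySem.List.slice_to _ (by norm_num : (0:Int) ≤ 1)]
  exact eq_comm

-- len(line[:cb]) = cb when cb = line.find("]") ≥ 0.
theorem len_slice_find (line : String) (i : Int) (hi : i = PySem.Str.find line "]") (h2 : 0 ≤ i) :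
    (PySem.Str.len (PySem.Str.slice line none (some i)) : Int) = i := by
  have h := PySem.Chars.find_le_length line.toList "]".toList
  simp [PySem.List.slice_to _ h2] at *
  omega

-- One step of A's loop, expressed through B's parser.
theorem loopA_cons (n line : String) (rest : List String) :
    resolveLoopA n (line :: rest) =
      match parseCourseLine? line with
      | none => resolveLoopA n rest
      | some p => if p.1 = n then p.2 else resolveLoopA n rest := by
  rw [resolveLoopA]; unfold parseCourseLine?
  by_cases h1 : PySem.Str.startswith line "[" = true
  · rw [if_neg (not_not_intro h1), if_neg (not_not_intro ((slice_one_eq_bracket_iff line).mpr h1))]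
    by_cases hneg : PySem.Str.find line "]" = -1
    · rw [if_pos (by rw [hneg]; norm_num), if_pos hneg]
    · have h0 : 0 ≤ PySem.Str.find line "]" := by
        have := PySem.Chars.neg_one_le_find line.toList "]".toList
        simp at *
        omega
      have hlen := len_slice_find line (PySem.Str.find line "]") rfl h0
      rw [if_neg hneg]
      by_cases h2 : PySem.Str.find line "]" ≤ 1
      · have hle : PySem.Str.len (PySem.Str.slice line none (some (PySem.Str.find line "]"))) ≤ 1 := by omega
        rw [if_pos h2, if_pos hle]
      · have hgt : ¬ PySem.Str.len (PySem.Str.slice line none (some (PySem.Str.find line "]"))) ≤ 1 := by omega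
        rw [if_neg h2, if_neg hgt, slice_slice_one line _ h0]
        by_cases h3 : n = PySem.Str.lower (PySem.Str.strip (((PySem.Str.splitMax? (PySem.Str.lstrip (PySem.Str.slice line (some (PySem.Str.find line "]" + 1)) none)) " - " 1).getD []).headD ""))
        · rw [if_pos h3]; exact (if_pos h3.symm).symm
        · rw [if_neg h3]; exact (if_neg (Ne.symm h3)).symm
  · rw [if_pos h1, if_pos (fun h => h1 ((slice_one_eq_bracket_iff line).mp h))]

-- A's loop is the first match in the parsed pairs list.
theorem loopA_eq_findParsed (n : String) (ls : List String) :
    resolveLoopA n ls =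
      (((ls.filterMap parseCourseLine?).find? (fun p => p.1 == n)).map (·.2)).getD "" := by
  induction ls with
  | nil => simp [resolveLoopA]
  | cons line rest ih =>
    rw [loopA_cons, List.filterMap_cons]
    cases hp : parseCourseLine? line with
    | none => simpa using ih
    | some p =>
      by_cases hp1 : p.1 = n
      · simp [hp1]
      · simp [hp1, ih]

-- A fold of inserts, looked up: the LAST matching pair of ps wins (first of ps.reverse).
theorem getD_foldl_insert (ps : List (String × String)) (d : PySem.Dict String String) (k : String) :
    (ps.foldl (fun d p => d.insert p.1 p.2) d).getD k "" =
      match ps.reverse.find? (fun p => p.1 == k) with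
      | some p => p.2
      | none => d.getD k "" := by
  induction ps generalizing d with
  | nil => simp
  | cons p rest ih =>
    rw [List.foldl_cons, ih, List.reverse_cons, List.find?_append]
    cases hf : rest.reverse.find? (fun p => p.1 == k) with
    | some q => simp
    | none =>
      by_cases hk : p.1 = k
      · subst hk; simp [PySem.Dict.getD_insert_self]
      · simp [hk, PySem.Dict.getD_insert, Ne.symm hk]

-- A's scan equals B's build-then-lookup.
theorem loopA_eq_index (n : String) (ls : List String) :
    resolveLoopA n ls =
      ((ls.reverse.filterMap parseCourseLine?).foldl (fun d p => d.insert p.1 p.2)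
        (PySem.Dict.empty : PySem.Dict String String)).getD n "" := by
  rw [loopA_eq_findParsed, getD_foldl_insert, List.filterMap_reverse, List.reverse_reverse]
  cases hf : (ls.filterMap parseCourseLine?).find? (fun p => p.1 == n) with
  | some q => rfl
  | none => rfl

-- ===== VERDICT (by name: the statement is the Claim_ definition above) =====
theorem resolve_course_reference_spec : Claim_equal_resolve_course_reference := by
  intro course_lines value _
  unfold Spec_resolve_course_reference resolve_course_reference resolve_course_reference_alt
  simp only [loopA_eq_index]
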